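-- pv_equiv track=rewrite | github.com/JOEEEgg/CodingTest | 코테_프로그래머스/입문/Day5/코드 처리하기.py | solution
-- ===== SOURCE A (Python) =====
-- def solution(code):
--     answer = ''
--     mode = 0
--     for idx, word in enumerate(code):
--         if word.isalpha():
--             if mode == 0 and idx % 2 == 0:
--                 answer += word
--             elif mode == 1 and idx % 2 == 1:
--                 answer += word
--
--         else:
--             if mode == 0:
--                 mode = 1
--             else:
--                 mode = 0
--     if len(answer) == 0:
--         return 'EMPTY'
--     else:
--         return answer
-- ===== SOURCE B (Python) =====
-- def solution(code):
--     # pass 1: exclusive prefix-parity table: modes[i] = mode active before index i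
--     modes = [0]
--     for ch in code:
--         modes.append(modes[-1] ^ (0 if ch.isalpha() else 1))
--     # pass 2: filter & join
--     answer = ''.join(c for i, (c, m) in enumerate(zip(code, modes))
--                      if c.isalpha() and m == i % 2)
--     return answer if answer else 'EMPTY'
-- ===== Notes on version B (the rewrite author's own statement) =====
-- stated objective: alternative
-- what changed: Replaces A's single fused loop (mutable toggle mode + conditional string append) by two separate passes: first an exclusive prefix-parity table of non-alpha counts, then a filter/join that keeps each alphabetic char whose table mode matches its index parity.
import Mathlib
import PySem

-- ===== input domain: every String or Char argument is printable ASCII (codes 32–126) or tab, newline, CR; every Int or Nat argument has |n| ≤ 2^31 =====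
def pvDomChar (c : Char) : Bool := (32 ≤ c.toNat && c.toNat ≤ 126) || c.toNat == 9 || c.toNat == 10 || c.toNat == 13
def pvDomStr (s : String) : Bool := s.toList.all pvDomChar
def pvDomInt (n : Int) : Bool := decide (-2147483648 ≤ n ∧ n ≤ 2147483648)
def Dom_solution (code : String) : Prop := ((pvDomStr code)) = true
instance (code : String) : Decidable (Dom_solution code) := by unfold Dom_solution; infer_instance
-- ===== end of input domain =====

-- B replaces A's fused toggling loop by two passes — an exclusive prefix-parity table, then a filter/join — same result (objective: alternative decomposition).

-- ===== PORT A =====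
-- A's fused loop: state (answer, mode), toggling mode on non-alpha chars.
def solutionStep (st : List Char × Int) (p : Int × Char) : List Char × Int :=
  let answer := st.1
  let mode := st.2
  let idx := p.1
  let word := p.2
  if PySem.Chars.isalpha word then
    if mode == 0 && PySem.Int.mod idx 2 == 0 then (answer ++ [word], mode)
    else if mode == 1 && PySem.Int.mod idx 2 == 1 then (answer ++ [word], mode)
    else (answer, mode)
  else
    if mode == 0 then (answer, 1) else (answer, 0)

def solution (code : String) : String :=
  let r := (PySem.List.enumerate code.toList 0).foldl solutionStep ([], 0)
  if r.1.length = 0 then "EMPTY" else String.ofList r.1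

-- ===== PORT B =====
-- pass 1 of Source B: exclusive prefix-parity table (the append-to-modes loop, as a scan)
def modeTable (cs : List Char) : List Nat :=
  cs.scanl (fun m c => m ^^^ (if PySem.Chars.isalpha c then 0 else 1)) 0

def solution_alt (code : String) : String :=
  let cs := code.toList
  let modes := modeTable cs
  -- pass 2: filter over enumerate(zip(code, modes)) and join
  let answer := (((cs.zip modes).zipIdx 0).filter
      (fun q => PySem.Chars.isalpha q.1.1 && q.1.2 == q.2 % 2)).map (fun q => q.1.1)
  if answer = [] then "EMPTY" else String.ofList answer

-- ===== PRECONDITION & SPEC =====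
def Spec_solution (code : String) (out : String) : Prop := out = solution_alt code
instance (code : String) (out : String) : Decidable (Spec_solution code out) := by unfold Spec_solution; infer_instance

-- ===== CLAIM (what is proved, stated in full; the proofs are below) =====
def Claim_equal_solution : Prop := ∀ (code : String), Dom_solution code → Spec_solution code (solution code)

-- ===== LEMMAS AND PROOFS =====

-- proof-side common specification of the selected characters
def pick : List Char → Nat → Nat → List Char
  | [], _, _ => []
  | c :: cs, j, p =>
    if PySem.Chars.isalpha c then
      (if p = j % 2 then [c] else []) ++ pick cs (j + 1) p
    else
      pick cs (j + 1) (p ^^^ 1)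

def finalMode (cs : List Char) (p : Nat) : Nat :=
  (p + cs.countP (fun c => !PySem.Chars.isalpha c)) % 2

lemma mod_two_natCast (j : Nat) : PySem.Int.mod (j : Int) 2 = ((j % 2 : Nat) : Int) := by
  exact_mod_cast PySem.Int.mod_natCast j 2

lemma foldA_spec (cs : List Char) : ∀ (j p : Nat) (ans : List Char), p = 0 ∨ p = 1 →
    (PySem.List.enumerate cs (j : Int)).foldl solutionStep (ans, (p : Int))
      = (ans ++ pick cs j p, (finalMode cs p : Int)) := by
  induction cs with
  | nil =>
    intro j p ans hp
    simp [PySem.List.enumerate_nil, pick, finalMode, List.countP]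
    omega
  | cons c cs ih =>
    intro j p ans hp
    rw [PySem.List.enumerate_cons]
    simp only [List.foldl_cons]
    have hmod := mod_two_natCast j
    by_cases hc : PySem.Chars.isalpha c
    · have hsel : solutionStep (ans, (p : Int)) ((j : Int), c)
          = ((ans ++ if p = j % 2 then [c] else [], (p : Int)) : List Char × Int) := by
        simp only [solutionStep, hc, if_pos, hmod]
        rcases hp with h | h <;> subst h <;>
          rcases Nat.mod_two_eq_zero_or_one j with h2 | h2 <;>
          simp [h2]
      rw [hsel]
      have : ((j : Int) + 1) = ((j + 1 : Nat) : Int) := by push_cast; ring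
      rw [this, ih (j + 1) p _ hp]
      simp [pick, hc, finalMode]
    · have hsel : solutionStep (ans, (p : Int)) ((j : Int), c)
          = ((ans, ((p ^^^ 1 : Nat) : Int)) : List Char × Int) := by
        simp only [solutionStep, hc]
        rcases hp with h | h <;> subst h <;> simp
      rw [hsel]
      have : ((j : Int) + 1) = ((j + 1 : Nat) : Int) := by push_cast; ring
      rw [this, ih (j + 1) (p ^^^ 1) _ (by rcases hp with h | h <;> subst h <;> simp)]
      have hm : ((p ^^^ 1) + List.countP (fun c => !PySem.Chars.isalpha c) cs) % 2
          = finalMode (c :: cs) p := by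
        unfold finalMode
        rcases hp with h | h <;> subst h <;> simp [hc] <;> omega
      simp [pick, hc, finalMode] at hm ⊢
      omega

lemma foldB_spec (cs : List Char) : ∀ (j p : Nat), p = 0 ∨ p = 1 →
    (((cs.zip (cs.scanl (fun m c => m ^^^ (if PySem.Chars.isalpha c then 0 else 1)) p)).zipIdx j).filter
        (fun q => PySem.Chars.isalpha q.1.1 && q.1.2 == q.2 % 2)).map (fun q => q.1.1)
      = pick cs j p := by
  induction cs with
  | nil => intro j p hp; simp [pick]
  | cons c cs ih =>
    intro j p hp
    by_cases hc : PySem.Chars.isalpha c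
    · have hstep : (p ^^^ (if PySem.Chars.isalpha c then 0 else 1)) = p := by simp [hc]
      rw [List.scanl_cons, List.zip_cons_cons, List.zipIdx_cons, List.filter_cons, hstep]
      have htail := ih (j + 1) p hp
      by_cases hpj : p = j % 2
      · have hcond : (PySem.Chars.isalpha c && p == j % 2) = true := by simp [hc, hpj]
        have hif : (if p = j % 2 then [c] else []) = [c] := if_pos hpj
        rw [hcond]
        simp only [List.map_cons, pick, hc, if_pos, hif, htail,
          List.singleton_append]
      · have hcond : (PySem.Chars.isalpha c && p == j % 2) = false := by simp [hc, hpj]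
        have hif : (if p = j % 2 then [c] else []) = [] := if_neg hpj
        rw [hcond]
        simp only [Bool.false_eq_true, if_false, pick, hc, if_pos, hif, List.nil_append]
        exact htail
    · have hstep : (p ^^^ (if PySem.Chars.isalpha c then 0 else 1)) = p ^^^ 1 := by simp [hc]
      have hcond : (PySem.Chars.isalpha c && p == j % 2) = false := by simp [hc]
      rw [List.scanl_cons, List.zip_cons_cons, List.zipIdx_cons, List.filter_cons, hstep, hcond]
      simp only [Bool.false_eq_true, if_false, pick, hc]
      exact ih (j + 1) (p ^^^ 1) (by rcases hp with h | h <;> subst h <;> simp)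

-- ===== VERDICT (by name: the statement is the Claim_ definition above) =====
theorem solution_spec : Claim_equal_solution := by
  intro code _
  unfold Spec_solution solution solution_alt modeTable
  have hA := foldA_spec code.toList 0 0 [] (Or.inl rfl)
  have hB := foldB_spec code.toList 0 0 (Or.inl rfl)
  simp only [Nat.cast_zero] at hA hB
  simp only [hA, hB, List.nil_append, List.length_eq_zero_iff]
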